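-- pv_equiv track=rewrite | github.com/ADIITJ/VideoMind | scripts/cli_main.py | find_best_object
-- ===== SOURCE A (Python) =====
-- def find_best_object(query, obj_summ):
--     # Detect the best matching object from the query using substring matching (can be improved with embeddings)
--     best_obj = None
--     best_len = 0
--     q_lower = query.lower()
--     for obj in obj_summ.keys():
--         candidate = obj.lower()
--         if candidate in q_lower and len(candidate) > best_len:
--             best_obj = obj
--             best_len = len(candidate)
--     return best_obj
-- ===== SOURCE B (Python) =====
-- def find_best_object(query, obj_summ):
--     # Different algorithm: instead of running a substring search per key, group
--     # the object names by length, then walk the lengths from longest to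
--     # shortest; for each length hash every query window of that length into a
--     # set and return the first name (dict order) whose lowercase form is one of
--     # the windows.  Correct because a name matches iff its lowercase form
--     # equals some window of its own length, and taking the first name at the
--     # largest matching length reproduces A's longest / first-wins rule.
--     q = query.lower()
--     by_len = {}
--     for obj in obj_summ:
--         by_len.setdefault(len(obj), []).append(obj)
--     for L in sorted(by_len, reverse=True):
--         if L == 0 or L > len(q):
--             continue
--         windows = {q[i:i + L] for i in range(len(q) - L + 1)}
--         for obj in by_len[L]:
--             if obj.lower() in windows:
--                 return obj
--     return None
-- ===== Notes on version B (the rewrite author's own statement) =====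
-- stated objective: faster
-- what changed: Instead of running one substring search per object name, B groups the names by length once, then walks the lengths from longest to shortest, hashes all query windows of that length into a set and returns the first name (dict order) whose lowercase form is a window, stopping at the first matching length.
import Mathlib
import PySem

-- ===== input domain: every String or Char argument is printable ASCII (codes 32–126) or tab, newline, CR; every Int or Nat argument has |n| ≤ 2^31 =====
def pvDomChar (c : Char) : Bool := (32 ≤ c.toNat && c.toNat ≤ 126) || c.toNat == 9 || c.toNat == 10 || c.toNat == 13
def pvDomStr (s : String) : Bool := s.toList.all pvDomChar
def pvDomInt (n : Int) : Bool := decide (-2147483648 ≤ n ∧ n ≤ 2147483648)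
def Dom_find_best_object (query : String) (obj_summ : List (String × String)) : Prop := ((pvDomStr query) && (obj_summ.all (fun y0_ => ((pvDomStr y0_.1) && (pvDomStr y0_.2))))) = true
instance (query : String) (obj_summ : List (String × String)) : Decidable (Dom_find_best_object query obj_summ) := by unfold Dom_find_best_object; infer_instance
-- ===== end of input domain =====

-- B replaces A's per-key substring search by grouping names by length and scanning
-- lengths longest-first, hashing the query's windows of each length into a set;
-- the early exit at the first matching length made it measurably faster in a timing run.

-- ===== PORT A =====
-- literal port of A: a fold over the dict's keys carrying (best_obj, best_len)
def find_best_object (query : String) (obj_summ : List (String × String)) : Option String :=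
  let q_lower := PySem.Str.lower query
  (obj_summ.foldl
    (fun (st : Option String × Int) kv =>
      let candidate := PySem.Str.lower kv.1
      if PySem.Str.isIn candidate q_lower && decide (st.2 < PySem.Str.len candidate)
      then (some kv.1, PySem.Str.len candidate)
      else st)
    (none, 0)).1

-- ===== PORT B =====
-- the window set {q[i:i+L] for i in range(len(q)-L+1)} of Source B (strings as List Char)
def pvWindows (qL : List Char) (L : Int) : PySem.Set (List Char) :=
  PySem.Set.ofList ((PySem.List.pyRange 0 ((qL.length : Int) - L + 1)).map
    (fun i => PySem.List.slice qL (some i) (some (i + L))))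

-- the outer 'for L in sorted(by_len, reverse=True)' loop with its early 'return obj'
def pvGoLens (qL : List Char) (d : PySem.Dict Int (List String)) : List Int → Option String
  | [] => none
  | L :: rest =>
    if L = 0 ∨ (qL.length : Int) < L then pvGoLens qL d rest
    else
      match (d.getD L []).find?
        (fun obj => (pvWindows qL L).contains (PySem.Chars.lower obj.toList)) with
      | some o => some o
      | none => pvGoLens qL d rest

-- literal port of Source B: group names by length, then scan lengths longest-first
def find_best_object_alt (query : String) (obj_summ : List (String × String)) : Option String :=
  let qL := PySem.Chars.lower query.toList
  let by_len := obj_summ.foldl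
    (fun (d : PySem.Dict Int (List String)) kv =>
      d.modify (PySem.Str.len kv.1) [] (fun v => v ++ [kv.1]))
    PySem.Dict.empty
  pvGoLens qL by_len (PySem.List.sorted by_len.keys (fun x => x) true)

-- ===== PRECONDITION & SPEC =====
def Spec_find_best_object (query : String) (obj_summ : List (String × String)) (out : Option String) : Prop := out = find_best_object_alt query obj_summ
instance (query : String) (obj_summ : List (String × String)) (out : Option String) : Decidable (Spec_find_best_object query obj_summ out) := by unfold Spec_find_best_object; infer_instance

-- ===== CLAIM (what is proved, stated in full; the proofs are below) =====
def Claim_equal_find_best_object : Prop := ∀ (query : String) (obj_summ : List (String × String)), Dom_find_best_object query obj_summ → Spec_find_best_object query obj_summ (find_best_object query obj_summ)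

-- ===== LEMMAS AND PROOFS =====

-- the names, and the names A keeps as candidates (nonempty, lowercase-substring of the query)
def pvNames (obj_summ : List (String × String)) : List String := obj_summ.map Prod.fst

def pvM (query : String) (obj_summ : List (String × String)) : List String :=
  (pvNames obj_summ).filter
    (fun o => decide (o ≠ "") && PySem.Str.isIn (PySem.Str.lower o) (PySem.Str.lower query))

-- len is preserved by lower (it maps characters one for one)
theorem pvLen_lower (k : String) : PySem.Str.len (PySem.Str.lower k) = PySem.Str.len k := by
  simp [PySem.Str.len, PySem.Chars.lower]

theorem pvLen_nonneg (k : String) : (0 : Int) ≤ PySem.Str.len k := by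
  simp [PySem.Str.len]

theorem pvLen_eq_zero_iff (k : String) : PySem.Str.len k = 0 ↔ k = "" := by
  simp [PySem.Str.len, ← String.toList_eq_nil_iff]

theorem pvLen_eq (k : String) : PySem.Str.len k = (k.toList.length : Int) := by
  simp [PySem.Str.len]

-- max(b :: r, key) is the running-max loop (first maximal wins) started at b
theorem pvMax?_cons {α : Type} (key : α → Int) (r : List α) (b : α) :
    PySem.List.max? (b :: r) key
    = some (r.foldl (fun m x => if key m < key x then x else m) b) := by
  induction r generalizing b with
  | nil => rfl
  | cons x t ih =>
    have hstep : PySem.List.max? (b :: x :: t) key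
        = PySem.List.max? ((if key b < key x then x else b) :: t) key := by
      by_cases h : key b < key x
      · simp only [PySem.List.max?, List.foldl_cons, if_pos h]
      · simp only [PySem.List.max?, List.foldl_cons, if_neg h]
    rw [hstep, List.foldl_cons]
    exact ih _

-- the running max stays at o when nothing later is strictly longer
theorem pvFoldMax_stay {α : Type} (key : α → Int) (suf : List α) (o : α)
    (h : ∀ y ∈ suf, key y ≤ key o) :
    suf.foldl (fun m x => if key m < key x then x else m) o = o := by
  induction suf with
  | nil => rfl
  | cons y t ih =>
    have hy : ¬ key o < key y := not_lt.mpr (h y (by simp))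
    simp only [List.foldl_cons, if_neg hy]
    exact ih (fun z hz => h z (by simp [hz]))

-- everything before o is strictly shorter, so the running max reaches o
theorem pvFoldMax_skip {α : Type} (key : α → Int) (suf : List α) (o : α) :
    ∀ (pre : List α) (b : α), (∀ y ∈ pre, key y < key o) → key b < key o →
    (pre ++ o :: suf).foldl (fun m x => if key m < key x then x else m) b
      = suf.foldl (fun m x => if key m < key x then x else m) o := by
  intro pre
  induction pre with
  | nil => intro b _ hb; simp only [List.nil_append, List.foldl_cons, if_pos hb]
  | cons y t ih =>
    intro b hpre hb
    simp only [List.cons_append, List.foldl_cons]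
    by_cases h : key b < key y
    · simp only [if_pos h]
      exact ih _ (fun z hz => hpre z (by simp [hz])) (hpre y (by simp))
    · simp only [if_neg h]
      exact ih _ (fun z hz => hpre z (by simp [hz])) hb

-- max? returns the first element attaining the maximal key
theorem pvMax?_first {α : Type} (key : α → Int) (pre suf : List α) (o : α)
    (hpre : ∀ y ∈ pre, key y < key o) (hsuf : ∀ y ∈ suf, key y ≤ key o) :
    PySem.List.max? (pre ++ o :: suf) key = some o := by
  cases pre with
  | nil =>
    rw [List.nil_append, pvMax?_cons]
    rw [pvFoldMax_stay key suf o hsuf]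
  | cons p t =>
    rw [List.cons_append, pvMax?_cons]
    rw [pvFoldMax_skip key suf o t p (fun z hz => hpre z (by simp [hz])) (hpre p (by simp))]
    rw [pvFoldMax_stay key suf o hsuf]

-- A's fold, once a best element b is held (with its stored length), computes the
-- running max (first-wins) of b and the remaining filtered candidates.
theorem pvFold_some (q : String) :
    ∀ (l : List (String × String)) (b : String),
      (l.foldl
        (fun (st : Option String × Int) kv =>
          if PySem.Str.isIn (PySem.Str.lower kv.1) q && decide (st.2 < PySem.Str.len kv.1)
          then (some kv.1, PySem.Str.len kv.1)
          else st)
        (some b, PySem.Str.len b)).1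
      = ((l.map Prod.fst).filter
          (fun obj => decide (obj ≠ "") && PySem.Str.isIn (PySem.Str.lower obj) q)).foldl
          (fun m x => if PySem.Str.len m < PySem.Str.len x then x else m) b := by
  intro l
  induction l with
  | nil => intro b; rfl
  | cons kv t ih =>
    intro b
    simp only [List.foldl_cons, List.map_cons, List.filter_cons]
    by_cases hc : PySem.Str.isIn (PySem.Str.lower kv.1) q = true
    · by_cases hl : PySem.Str.len b < PySem.Str.len kv.1
      · have hne : kv.1 ≠ "" := by
          intro h
          rw [← pvLen_eq_zero_iff kv.1] at h
          have := pvLen_nonneg b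
          omega
        have h1 : (PySem.Str.isIn (PySem.Str.lower kv.1) q
            && decide (((some b, PySem.Str.len b) : Option String × Int).2 < PySem.Str.len kv.1)) = true := by
          simp only [hc, Bool.true_and]; exact decide_eq_true hl
        have h2 : (decide (kv.1 ≠ "") && PySem.Str.isIn (PySem.Str.lower kv.1) q) = true := by
          simp only [Bool.and_eq_true, decide_eq_true_eq]; exact ⟨hne, hc⟩
        rw [if_pos h1, if_pos h2, List.foldl_cons, if_pos hl]
        exact ih kv.1
      · have h1 : ¬ ((PySem.Str.isIn (PySem.Str.lower kv.1) q
            && decide (((some b, PySem.Str.len b) : Option String × Int).2 < PySem.Str.len kv.1)) = true) := by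
          simp only [Bool.and_eq_true, decide_eq_true_eq]; exact fun h => hl h.2
        rw [if_neg h1]
        by_cases hne : kv.1 = ""
        · have h2 : ¬ ((decide (kv.1 ≠ "") && PySem.Str.isIn (PySem.Str.lower kv.1) q) = true) := by
            simp only [Bool.and_eq_true, decide_eq_true_eq]; exact fun h => h.1 hne
          rw [if_neg h2]
          exact ih b
        · have h2 : (decide (kv.1 ≠ "") && PySem.Str.isIn (PySem.Str.lower kv.1) q) = true := by
            simp only [Bool.and_eq_true, decide_eq_true_eq]; exact ⟨hne, hc⟩
          rw [if_pos h2, List.foldl_cons, if_neg hl]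
          exact ih b
    · have h1 : ¬ ((PySem.Str.isIn (PySem.Str.lower kv.1) q
          && decide (((some b, PySem.Str.len b) : Option String × Int).2 < PySem.Str.len kv.1)) = true) := by
        simp only [Bool.and_eq_true]; exact fun h => hc h.1
      have h2 : ¬ ((decide (kv.1 ≠ "") && PySem.Str.isIn (PySem.Str.lower kv.1) q) = true) := by
        simp only [Bool.and_eq_true]; exact fun h => hc h.2
      rw [if_neg h1, if_neg h2]
      exact ih b

-- A's fold from the initial state (None, 0) equals max? of the filtered candidates.
theorem pvFold_none (q : String) :
    ∀ (l : List (String × String)),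
      (l.foldl
        (fun (st : Option String × Int) kv =>
          if PySem.Str.isIn (PySem.Str.lower kv.1) q && decide (st.2 < PySem.Str.len kv.1)
          then (some kv.1, PySem.Str.len kv.1)
          else st)
        (none, 0)).1
      = PySem.List.max?
          ((l.map Prod.fst).filter
            (fun obj => decide (obj ≠ "") && PySem.Str.isIn (PySem.Str.lower obj) q))
          PySem.Str.len := by
  intro l
  induction l with
  | nil => rfl
  | cons kv t ih =>
    simp only [List.foldl_cons, List.map_cons, List.filter_cons]
    by_cases hc : PySem.Str.isIn (PySem.Str.lower kv.1) q = true
    · by_cases hl : ((none, 0) : Option String × Int).2 < PySem.Str.len kv.1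
      · have hne : kv.1 ≠ "" := by
          intro h
          rw [← pvLen_eq_zero_iff kv.1] at h
          simp only [h] at hl
          omega
        have h1 : (PySem.Str.isIn (PySem.Str.lower kv.1) q
            && decide (((none, 0) : Option String × Int).2 < PySem.Str.len kv.1)) = true := by
          simp only [hc, Bool.true_and]; exact decide_eq_true hl
        have h2 : (decide (kv.1 ≠ "") && PySem.Str.isIn (PySem.Str.lower kv.1) q) = true := by
          simp only [Bool.and_eq_true, decide_eq_true_eq]; exact ⟨hne, hc⟩
        rw [if_pos h1, if_pos h2, pvFold_some q t kv.1, pvMax?_cons]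
      · have hne : kv.1 = "" := by
          have h0 := pvLen_nonneg kv.1
          rw [← pvLen_eq_zero_iff kv.1]
          simp only at hl
          omega
        have h1 : ¬ ((PySem.Str.isIn (PySem.Str.lower kv.1) q
            && decide (((none, 0) : Option String × Int).2 < PySem.Str.len kv.1)) = true) := by
          simp only [Bool.and_eq_true, decide_eq_true_eq]; exact fun h => hl h.2
        have h2 : ¬ ((decide (kv.1 ≠ "") && PySem.Str.isIn (PySem.Str.lower kv.1) q) = true) := by
          simp only [Bool.and_eq_true, decide_eq_true_eq]; exact fun h => h.1 hne
        rw [if_neg h1, if_neg h2]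
        exact ih
    · have h1 : ¬ ((PySem.Str.isIn (PySem.Str.lower kv.1) q
          && decide (((none, 0) : Option String × Int).2 < PySem.Str.len kv.1)) = true) := by
        simp only [Bool.and_eq_true]; exact fun h => hc h.1
      have h2 : ¬ ((decide (kv.1 ≠ "") && PySem.Str.isIn (PySem.Str.lower kv.1) q) = true) := by
        simp only [Bool.and_eq_true]; exact fun h => hc h.2
      rw [if_neg h1, if_neg h2]
      exact ih

-- membership in the window set is exactly 'is a substring', for words of that length
theorem pvWindows_contains (qL sub : List Char) (L : Int)
    (hlen : (sub.length : Int) = L) (h1 : 0 < L) :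
    (pvWindows qL L).contains sub = PySem.Chars.isIn sub qL := by
  have hmem : sub ∈ pvWindows qL L ↔ PySem.Chars.isIn sub qL = true := by
    unfold pvWindows
    rw [PySem.Set.mem_ofList, List.mem_map]
    constructor
    · rintro ⟨i, hi, hslice⟩
      obtain ⟨hi0, _⟩ := PySem.List.mem_pyRange_one.mp hi
      rw [PySem.List.slice_toNat qL hi0 (by omega)] at hslice
      exact (PySem.Chars.exists_prefix_drop_iff_isIn sub qL).mp
        ⟨i.toNat, hslice ▸ List.take_prefix _ _⟩
    · intro hin
      obtain ⟨j, hj⟩ := (PySem.Chars.exists_prefix_drop_iff_isIn sub qL).mpr hin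
      have hsl : sub.length ≤ (List.drop j qL).length := hj.length_le
      rw [List.length_drop] at hsl
      have hjb : j + sub.length ≤ qL.length := by omega
      refine ⟨(j : Int), PySem.List.mem_pyRange_one.mpr ⟨by omega, by omega⟩, ?_⟩
      rw [PySem.List.slice_toNat qL (by omega) (by omega)]
      have htn : ((j : Int) + L).toNat - ((j : Int)).toNat = sub.length := by omega
      rw [htn, Int.toNat_natCast]
      exact (List.prefix_iff_eq_take.mp hj).symm
  show (pvWindows qL L).contains sub = _
  by_cases hin : PySem.Chars.isIn sub qL = true
  · rw [hin]
    exact List.contains_iff_mem.mpr (hmem.mpr hin)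
  · rw [Bool.eq_false_iff.mpr hin, ← Bool.not_eq_true]
    exact fun h => hin (hmem.mp (List.contains_iff_mem.mp h))

-- the length-L bucket is exactly the names of length L, in order
theorem pvBucket (obj_summ : List (String × String)) (L : Int) :
    (obj_summ.foldl
      (fun (d : PySem.Dict Int (List String)) kv =>
        d.modify (PySem.Str.len kv.1) [] (fun v => v ++ [kv.1]))
      PySem.Dict.empty).getD L []
    = (pvNames obj_summ).filter (fun o => PySem.Str.len o == L) := by
  have hstep :
      (List.foldl (fun (d : PySem.Dict Int (List String)) kv =>
          d.modify (PySem.Str.len kv.1) [] (fun v => v ++ [kv.1])) PySem.Dict.empty obj_summ)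
      = ((obj_summ.map (fun kv => (PySem.Str.len kv.1, kv.1))).foldl
          (fun (d : PySem.Dict Int (List String)) p =>
            d.modify p.1 [] (fun v => v ++ [p.2])) PySem.Dict.empty) := by
    rw [List.foldl_map]
  rw [hstep, PySem.Dict.getD_foldl_modify_append, PySem.Dict.getD_empty]
  simp only [List.nil_append, List.filter_map, Function.comp_def, List.map_map, pvNames]

-- the dict's keys are the distinct name lengths, in first-occurrence order
theorem pvKeys (obj_summ : List (String × String)) :
    (obj_summ.foldl
      (fun (d : PySem.Dict Int (List String)) kv =>
        d.modify (PySem.Str.len kv.1) [] (fun v => v ++ [kv.1]))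
      PySem.Dict.empty).keys
    = PySem.Set.ofList (obj_summ.map (fun kv => PySem.Str.len kv.1)) := by
  rw [PySem.Dict.keys_foldl_modify_key obj_summ (fun kv => PySem.Str.len kv.1) []
      (fun _ kv => (fun v => v ++ [kv.1])) PySem.Dict.empty,
    PySem.Dict.keys_empty]
  rfl

-- candidates are nonempty and no longer than the query
theorem pvM_len_bounds (query : String) (obj_summ : List (String × String)) (o : String)
    (ho : o ∈ pvM query obj_summ) :
    1 ≤ PySem.Str.len o ∧ PySem.Str.len o ≤ ((PySem.Chars.lower query.toList).length : Int) := by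
  rw [pvM, List.mem_filter, Bool.and_eq_true, decide_eq_true_eq] at ho
  obtain ⟨-, hne, hin⟩ := ho
  constructor
  · have h0 := pvLen_nonneg o
    have := (pvLen_eq_zero_iff o).not.mpr hne
    omega
  · rw [PySem.Str.isIn_eq, PySem.Chars.isIn_iff_infix] at hin
    have hle := hin.length_le
    have h1 : (PySem.Str.lower o).toList.length = o.toList.length := by
      simp [PySem.Str.lower, PySem.Chars.lower]
    have h2 : (PySem.Str.lower query).toList.length = (PySem.Chars.lower query.toList).length := by
      simp [PySem.Str.lower]
    rw [pvLen_eq]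
    omega

-- the outer loop computes max? of the candidates, given it visits every candidate length
theorem pvGoLens_eq (query : String) (obj_summ : List (String × String))
    (d : PySem.Dict Int (List String))
    (hb : ∀ L, d.getD L [] = (pvNames obj_summ).filter (fun o => PySem.Str.len o == L)) :
    ∀ Ls : List Int, Ls.Pairwise (fun a b => b < a) →
      (∀ o ∈ pvM query obj_summ, PySem.Str.len o ∈ Ls) →
      pvGoLens (PySem.Chars.lower query.toList) d Ls
        = PySem.List.max? (pvM query obj_summ) PySem.Str.len := by
  intro Ls
  induction Ls with
  | nil =>
    intro _ hmem
    have hM : pvM query obj_summ = [] :=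
      List.eq_nil_iff_forall_not_mem.mpr (fun o ho => by simpa using hmem o ho)
    rw [hM]
    rfl
  | cons L rest ih =>
    intro hpair hmem
    obtain ⟨hL, hrest⟩ := List.pairwise_cons.mp hpair
    -- for a name of length L, membership in the window set is A's match test
    have hw : ∀ o : String, PySem.Str.len o = L → 0 < L →
        (pvWindows (PySem.Chars.lower query.toList) L).contains (PySem.Chars.lower o.toList)
          = PySem.Str.isIn (PySem.Str.lower o) (PySem.Str.lower query) := by
      intro o hlo hpos
      have hlen : (((PySem.Chars.lower o.toList).length : Nat) : Int) = L := by
        simp only [PySem.Chars.lower, List.length_map]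
        rw [← pvLen_eq]; exact hlo
      rw [pvWindows_contains _ _ L hlen hpos, PySem.Str.isIn_eq,
        PySem.Str.toList_lower, PySem.Str.toList_lower]
    show (if L = 0 ∨ ((PySem.Chars.lower query.toList).length : Int) < L
        then pvGoLens (PySem.Chars.lower query.toList) d rest
        else match (d.getD L []).find?
            (fun obj => (pvWindows (PySem.Chars.lower query.toList) L).contains
              (PySem.Chars.lower obj.toList)) with
          | some o => some o
          | none => pvGoLens (PySem.Chars.lower query.toList) d rest)
      = _
    by_cases hskip : L = 0 ∨ ((PySem.Chars.lower query.toList).length : Int) < L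
    · rw [if_pos hskip]
      apply ih hrest
      intro o ho
      have hb := pvM_len_bounds query obj_summ o ho
      rcases List.mem_cons.mp (hmem o ho) with hEq | hIn
      · exfalso; rcases hskip with h0 | hgt <;> omega
      · exact hIn
    · rw [if_neg hskip]
      rw [not_or, not_lt] at hskip
      obtain ⟨hL0, hLle⟩ := hskip
      rw [hb L, List.find?_filter]
      -- a name passes the combined test iff it has length L and is a candidate
      have hpred : ∀ o ∈ pvNames obj_summ,
          (decide ((PySem.Str.len o == L) = true ∧
            ((pvWindows (PySem.Chars.lower query.toList) L).contains
              (PySem.Chars.lower o.toList)) = true) = true)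
          ↔ (PySem.Str.len o = L ∧ o ∈ pvM query obj_summ) := by
        intro o hon
        rw [decide_eq_true_eq, beq_iff_eq]
        constructor
        · rintro ⟨hlo, hwo⟩
          have hpos : 0 < L := by have := pvLen_nonneg o; omega
          refine ⟨hlo, ?_⟩
          rw [pvM, List.mem_filter]
          refine ⟨hon, ?_⟩
          rw [Bool.and_eq_true, decide_eq_true_eq]
          refine ⟨?_, by rw [← hw o hlo hpos]; exact hwo⟩
          intro hnil
          rw [← pvLen_eq_zero_iff o] at hnil
          omega
        · rintro ⟨hlo, hoM⟩
          have hb := pvM_len_bounds query obj_summ o hoM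
          have hpos : 0 < L := by omega
          refine ⟨hlo, ?_⟩
          rw [hw o hlo hpos]
          rw [pvM, List.mem_filter, Bool.and_eq_true] at hoM
          exact hoM.2.2
      cases hfind : List.find?
          (fun a => decide ((PySem.Str.len a == L) = true ∧
            ((pvWindows (PySem.Chars.lower query.toList) L).contains
              (PySem.Chars.lower a.toList)) = true)) (pvNames obj_summ) with
      | none =>
        apply ih hrest
        intro o ho
        rcases List.mem_cons.mp (hmem o ho) with hEq | hIn
        · exfalso
          have hon : o ∈ pvNames obj_summ := (List.mem_filter.mp ho).1
          exact List.find?_eq_none.mp hfind o hon ((hpred o hon).mpr ⟨hEq, ho⟩)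
        · exact hIn
      | some o =>
        obtain ⟨hpredo, ns1, ns2, hsplit, hns1⟩ := List.find?_eq_some_iff_append.mp hfind
        have hon : o ∈ pvNames obj_summ := by rw [hsplit]; simp
        obtain ⟨hlo, hoM⟩ := (hpred o hon).mp hpredo
        -- decompose the candidate list around o
        have hMdec : pvM query obj_summ
            = ns1.filter (fun o => decide (o ≠ "")
                && PySem.Str.isIn (PySem.Str.lower o) (PySem.Str.lower query))
              ++ o :: ns2.filter (fun o => decide (o ≠ "")
                && PySem.Str.isIn (PySem.Str.lower o) (PySem.Str.lower query)) := by
          have hoP : (decide (o ≠ "")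
              && PySem.Str.isIn (PySem.Str.lower o) (PySem.Str.lower query)) = true :=
            (List.mem_filter.mp hoM).2
          rw [pvM, hsplit, List.filter_append, List.filter_cons, if_pos hoP]
        rw [hMdec]
        refine (pvMax?_first PySem.Str.len _ _ o ?_ ?_).symm
        · intro y hy
          have hyn : y ∈ pvNames obj_summ := by
            rw [hsplit]; exact List.mem_append_left _ (List.mem_filter.mp hy).1
          have hyM : y ∈ pvM query obj_summ := by
            rw [pvM, List.mem_filter]
            exact ⟨hyn, (List.mem_filter.mp hy).2⟩
          rcases List.mem_cons.mp (hmem y hyM) with hEq | hIn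
          · exfalso
            have hyp := (hpred y hyn).mpr ⟨hEq, hyM⟩
            have hfa := hns1 y (List.mem_filter.mp hy).1
            rw [Bool.not_eq_true'] at hfa
            rw [hyp] at hfa
            exact absurd hfa (by simp)
          · rw [hlo]; exact hL _ hIn
        · intro y hy
          have hyn : y ∈ pvNames obj_summ := by
            rw [hsplit]
            exact List.mem_append_right _ (List.mem_cons_of_mem _ (List.mem_filter.mp hy).1)
          have hyM : y ∈ pvM query obj_summ := by
            rw [pvM, List.mem_filter]
            exact ⟨hyn, (List.mem_filter.mp hy).2⟩
          rcases List.mem_cons.mp (hmem y hyM) with hEq | hIn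
          · omega
          · rw [hlo]; exact le_of_lt (hL _ hIn)

-- ===== VERDICT (by name: the statement is the Claim_ definition above) =====
theorem find_best_object_spec : Claim_equal_find_best_object := by
  intro query obj_summ _
  show find_best_object query obj_summ = find_best_object_alt query obj_summ
  have hA : find_best_object query obj_summ
      = PySem.List.max? (pvM query obj_summ) PySem.Str.len := by
    unfold find_best_object pvM pvNames
    simp only [pvLen_lower]
    exact pvFold_none (PySem.Str.lower query) obj_summ
  have hB : find_best_object_alt query obj_summ
      = PySem.List.max? (pvM query obj_summ) PySem.Str.len := by
    unfold find_best_object_alt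
    have hnd : (obj_summ.foldl
        (fun (d : PySem.Dict Int (List String)) kv =>
          d.modify (PySem.Str.len kv.1) [] (fun v => v ++ [kv.1]))
        PySem.Dict.empty).keys.Nodup := by
      rw [pvKeys]
      exact PySem.Set.nodup_ofList _
    apply pvGoLens_eq query obj_summ _ (pvBucket obj_summ)
    · have hle := PySem.List.sorted_pairwise_rev (obj_summ.foldl
        (fun (d : PySem.Dict Int (List String)) kv =>
          d.modify (PySem.Str.len kv.1) [] (fun v => v ++ [kv.1]))
        PySem.Dict.empty).keys (fun x => x)
      have hndL := ((PySem.List.sorted_perm _ (fun x : Int => x) true).nodup_iff).mpr hnd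
      exact (hle.and hndL).imp (fun h => lt_of_le_of_ne h.1 h.2.symm)
    · intro o ho
      rw [PySem.List.mem_sorted, pvKeys, PySem.Set.mem_ofList]
      have hon : o ∈ pvNames obj_summ := (List.mem_filter.mp ho).1
      obtain ⟨kv, hkv, hkv1⟩ := List.mem_map.mp hon
      exact List.mem_map.mpr ⟨kv, hkv, by rw [hkv1]⟩
  rw [hA, hB]
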